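-- pv_equiv track=rewrite | github.com/superpavelka/Python-client-server-applications | Task4/4.2/max_neg.py | max_neg2
-- ===== SOURCE A (Python) =====
-- def max_neg2(a):
--     inf = float('inf')
--     max_neg_elem = -inf
--     max_neg_elem_i = -inf
--
--     for i, elem in a.items():
--         if elem < 0 and elem > max_neg_elem:
--             max_neg_elem = elem
--             max_neg_elem_i = i
--     if max_neg_elem > -inf:
--         return (max_neg_elem_i, max_neg_elem)
-- ===== SOURCE B (Python) =====
-- def max_neg2(a):
--     negs = [(i, e) for i, e in a.items() if e < 0]
--     if not negs:
--         return None
--     return max(negs, key=lambda kv: kv[1])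
-- ===== Notes on version B (the rewrite author's own statement) =====
-- stated objective: simpler
-- what changed: Replaces A's fused tracking loop over two -inf sentinel variables with a two-phase filter-then-max: collect the negative items, then take the builtin max by value (first maximal on ties, matching A's strict >), returning None explicitly when no negatives exist.
import Mathlib
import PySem

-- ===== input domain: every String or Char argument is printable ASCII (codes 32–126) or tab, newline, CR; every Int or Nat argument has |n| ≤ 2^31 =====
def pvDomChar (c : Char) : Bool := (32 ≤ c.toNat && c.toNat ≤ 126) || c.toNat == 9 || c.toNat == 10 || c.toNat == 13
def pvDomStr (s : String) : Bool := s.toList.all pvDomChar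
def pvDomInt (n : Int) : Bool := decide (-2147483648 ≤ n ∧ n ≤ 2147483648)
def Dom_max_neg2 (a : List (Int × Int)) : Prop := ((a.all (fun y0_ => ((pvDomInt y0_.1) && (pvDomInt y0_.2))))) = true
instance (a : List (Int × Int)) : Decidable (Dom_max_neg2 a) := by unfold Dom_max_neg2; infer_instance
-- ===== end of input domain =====

-- B replaces A's fused sentinel-tracking loop by a two-phase filter-then-max decomposition (same cost, simpler).


-- ===== PORT A =====
-- A tracks max_neg_elem / max_neg_elem_i starting at -inf; the Option state encodes
-- "still -inf" as none, so 'elem > max_neg_elem' is vacuously true in the none case.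
def max_neg2 (a : List (Int × Int)) : Option (Int × Int) :=
  a.foldl
    (fun best p =>
      match best with
      | none => if p.2 < 0 then some p else none
      | some b => if p.2 < 0 ∧ p.2 > b.2 then some p else best)
    none

-- ===== PORT B =====
def max_neg2_alt (a : List (Int × Int)) : Option (Int × Int) :=
  let negs := a.filter (fun p => p.2 < 0)
  if negs = [] then none
  else PySem.List.max? negs (fun kv => kv.2)

-- ===== PRECONDITION & SPEC =====
def Spec_max_neg2 (a : List (Int × Int)) (out : Option (Int × Int)) : Prop := out = max_neg2_alt a
instance (a : List (Int × Int)) (out : Option (Int × Int)) : Decidable (Spec_max_neg2 a out) := by unfold Spec_max_neg2; infer_instance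

-- ===== CLAIM (what is proved, stated in full; the proofs are below) =====
def Claim_equal_max_neg2 : Prop := ∀ (a : List (Int × Int)), Dom_max_neg2 a → Spec_max_neg2 a (max_neg2 a)

-- ===== LEMMAS AND PROOFS =====

-- A's fused loop is exactly max?'s fold restricted by the negativity filter.
theorem max_neg2_eq_max?_filter (a : List (Int × Int)) :
    max_neg2 a = PySem.List.max? (a.filter (fun p => p.2 < 0)) (fun kv => kv.2) := by
  unfold max_neg2 PySem.List.max?
  rw [List.foldl_filter]
  congr 1
  funext acc x
  rcases acc with _ | b <;> by_cases h : x.2 < 0 <;> simp [h]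

theorem max_neg2_spec_aux (a : List (Int × Int)) : max_neg2 a = max_neg2_alt a := by
  have halt : max_neg2_alt a =
      if a.filter (fun p => p.2 < 0) = [] then none
      else PySem.List.max? (a.filter (fun p => p.2 < 0)) (fun kv => kv.2) := rfl
  rw [max_neg2_eq_max?_filter, halt]
  by_cases h : a.filter (fun p => p.2 < 0) = []
  · rw [if_pos h, h]
    rfl
  · rw [if_neg h]

-- ===== VERDICT (by name: the statement is the Claim_ definition above) =====
theorem max_neg2_spec : Claim_equal_max_neg2 := by
  intro a _
  exact max_neg2_spec_aux a
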